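-- pv_equiv track=rewrite | github.com/FAIRmat-NFDI/pynxtools-xps | src/pynxtools_xps/vms/vamas_export.py | handle_repetitions
-- ===== SOURCE A (Python) =====
-- from typing import Any, Dict, List
-- from collections import Counter
--
-- def handle_repetitions(input_list: List[str]) -> List[str]:
--     """
--     Process a list of strings to handle repeated items by appending a suffix
--     to each duplicate item. The suffix is in the format '_n', where 'n' is the
--     occurrence number of that item in the list.
--
--     Parameters:
--     - input_list (List[str]): A list of strings where repeated items are
--       identified and renamed with a suffix.
--
--     Returns:
--     - List[str]: A new list where repeated items are modified by appending
--       a suffix to make them unique.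
--     """
--     counts = Counter(input_list)
--     result = []
--     occurrences = {}
--
--     for item in input_list:
--         if counts[item] > 1:
--             # If the item has been seen before, add a suffix
--             if item not in occurrences:
--                 occurrences[item] = 0
--             occurrences[item] += 1
--             result.append(f"{item}_{occurrences[item]}")
--         else:
--             result.append(item)
--
--     return result
-- ===== SOURCE B (Python) =====
-- from typing import List
--
--
-- def handle_repetitions(input_list: List[str]) -> List[str]:
--     result = list(input_list)
--     for item in dict.fromkeys(input_list):
--         idxs = [i for i, x in enumerate(input_list) if x == item]
--         if len(idxs) > 1:
--             for n, i in enumerate(idxs, 1):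
--                 result[i] = f"{item}_{n}"
--     return result
-- ===== Notes on version B (the rewrite author's own statement) =====
-- stated objective: alternative
-- what changed: Replaces A's single forward pass with a Counter and a running occurrences dict by an index-then-scatter pass: copy the input, group the positions of each distinct item, and overwrite the positions of every duplicated item with its 1-based rank in position order.
import Mathlib
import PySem

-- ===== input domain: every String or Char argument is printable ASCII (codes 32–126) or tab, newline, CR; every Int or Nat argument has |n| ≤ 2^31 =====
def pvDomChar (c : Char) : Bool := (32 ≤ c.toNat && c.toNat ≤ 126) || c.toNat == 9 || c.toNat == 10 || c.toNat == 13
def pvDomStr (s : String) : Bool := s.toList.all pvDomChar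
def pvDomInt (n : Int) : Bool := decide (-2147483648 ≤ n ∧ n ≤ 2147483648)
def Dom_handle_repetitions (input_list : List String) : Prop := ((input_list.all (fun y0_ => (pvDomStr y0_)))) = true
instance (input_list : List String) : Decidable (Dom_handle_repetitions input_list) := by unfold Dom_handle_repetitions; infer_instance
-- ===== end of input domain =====

-- B replaces A's forward pass (Counter + running occurrences dict) with an index-then-scatter
-- pass: copy the input, group positions per distinct item, overwrite duplicates by rank.
-- Objective: alternative decomposition (not faster).

-- ===== PORT A =====
-- one step of A's for-loop: state is (result, occurrences)
def handle_repetitions_step (counts : PySem.Dict String Int)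
    (st : List String × PySem.Dict String Int) (item : String) :
    List String × PySem.Dict String Int :=
  if counts.getD item 0 > 1 then
    -- if item not in occurrences: occurrences[item] = 0
    let occ0 := if st.2.contains item then st.2 else st.2.insert item 0
    -- occurrences[item] += 1
    let occ1 := occ0.modify item 0 (· + 1)
    (st.1 ++ [item ++ "_" ++ PySem.Int.toStr (occ1.getD item 0)], occ1)
  else
    (st.1 ++ [item], st.2)

def handle_repetitions (input_list : List String) : List String :=
  let counts := PySem.Dict.counter input_list
  (input_list.foldl (handle_repetitions_step counts) ([], PySem.Dict.empty)).1

-- ===== PORT B =====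
-- result = list(input_list); for item in dict.fromkeys(input_list): idxs = positions of item;
-- if len(idxs) > 1: for n, i in enumerate(idxs, 1): result[i] = f"{item}_{n}"
def handle_repetitions_alt (input_list : List String) : List String :=
  (PySem.List.dedup input_list).foldl (fun result item =>
    let idxs := ((PySem.List.enumerate input_list).filter (fun q => q.2 == item)).map (·.1)
    if idxs.length > 1 then
      (PySem.List.enumerate idxs 1).foldl
        (fun r q => PySem.List.pySetD r q.2 (item ++ "_" ++ PySem.Int.toStr q.1)) result
    else result) input_list

-- ===== PRECONDITION & SPEC =====
def Spec_handle_repetitions (input_list : List String) (out : List String) : Prop := out = handle_repetitions_alt input_list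
instance (input_list : List String) (out : List String) : Decidable (Spec_handle_repetitions input_list out) := by unfold Spec_handle_repetitions; infer_instance

-- ===== CLAIM (what is proved, stated in full; the proofs are below) =====
def Claim_equal_handle_repetitions : Prop := ∀ (input_list : List String), Dom_handle_repetitions input_list → Spec_handle_repetitions input_list (handle_repetitions input_list)

-- ===== LEMMAS AND PROOFS =====

-- common pointwise spec both ports are proved equal to
def pvSpec (xs : List String) : List String :=
  (PySem.List.enumerate xs).map (fun q =>
    if xs.count q.2 == 1 then q.2
    else q.2 ++ "_" ++
      PySem.Int.toStr (((PySem.List.slice xs none (some (q.1 + 1))).count q.2 : Int)))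

-- positions (as Python ints) of `item` in xs, with enumerate start s
def pvIdxs (xs : List String) (s : Int) (item : String) : List Int :=
  ((PySem.List.enumerate xs s).filter (fun q => q.2 == item)).map (·.1)

-- A-side loop invariant: with `occ` holding the prefix counts of the processed prefix `p`,
-- the rest of A's fold appends exactly the spec's entries for the remaining items.
lemma handle_repetitions_loop (xs : List String) :
    ∀ (rest p res : List String) (occ : PySem.Dict String Int),
      p ++ rest = xs →
      (∀ v, 1 < xs.count v → occ.getD v 0 = (p.count v : Int)) →
      (rest.foldl (handle_repetitions_step (PySem.Dict.counter xs)) (res, occ)).1 =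
        res ++ (PySem.List.enumerate rest (p.length : Int)).map (fun q =>
          if xs.count q.2 == 1 then q.2
          else q.2 ++ "_" ++
            PySem.Int.toStr (((PySem.List.slice xs none (some (q.1 + 1))).count q.2 : Int))) := by
  intro rest
  induction rest with
  | nil =>
    intro p res occ _ _
    simp [PySem.List.enumerate]
  | cons item rest' ih =>
    intro p res occ h hocc
    have hmem : item ∈ xs := by rw [← h]; simp
    have hpos : 0 < xs.count item := List.count_pos_iff.mpr hmem
    have htake : PySem.List.slice xs none (some ((p.length : Int) + 1)) = p ++ [item] := by
      have hc : ((p.length : Int) + 1) = ((p.length + 1 : Nat) : Int) := by push_cast; ring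
      rw [hc, PySem.List.slice_to_natCast, ← h]
      simp [List.take_append]
    have hcnt : (PySem.Dict.counter xs).getD item 0 = (xs.count item : Int) :=
      PySem.Dict.getD_counter xs item
    rw [List.foldl_cons, PySem.List.enumerate_cons]
    by_cases hdup : 1 < xs.count item
    · -- duplicate: A appends the incremented occurrence number
      have hocc1 : ((if occ.contains item then occ else occ.insert item 0).modify item 0
          (· + 1)).getD item 0 = (p.count item : Int) + 1 := by
        have hbase : ((if occ.contains item then occ else occ.insert item 0).modify item 0
            (· + 1)).getD item 0 = occ.getD item 0 + 1 := by
          split_ifs with hco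
          · simp
          · have h0 : occ.getD item 0 = 0 := by
              apply PySem.Dict.getD_of_not_contains
              exact eq_false_of_ne_true hco
            simp [h0]
        rw [hbase, hocc item hdup]
      have hstep : handle_repetitions_step (PySem.Dict.counter xs) (res, occ) item =
          (res ++ [item ++ "_" ++ PySem.Int.toStr ((p.count item : Int) + 1)],
           (if occ.contains item then occ else occ.insert item 0).modify item 0 (· + 1)) := by
        rw [handle_repetitions_step]
        rw [if_pos (by rw [hcnt]; exact_mod_cast hdup)]
        simp [hocc1]
      rw [hstep]
      have hcount_take : ((p ++ [item]).count item : Int) = (p.count item : Int) + 1 := by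
        simp [List.count_append]
      have hinv : ∀ v, 1 < xs.count v →
          ((if occ.contains item then occ else occ.insert item 0).modify item 0
            (· + 1)).getD v 0 = ((p ++ [item]).count v : Int) := by
        intro v hv
        by_cases hvi : v = item
        · subst hvi; rw [hocc1, hcount_take]
        · have hvi' : item ≠ v := fun hx => hvi hx.symm
          have : (p ++ [item]).count v = p.count v := by
            simp [List.count_append, hvi']
          rw [this, ← hocc v hv]
          split_ifs with hco
          · simp [PySem.Dict.getD_modify, hvi]
          · simp [PySem.Dict.getD_modify, PySem.Dict.getD_insert, hvi]
      rw [ih (p ++ [item]) _ _ (by simpa using h) hinv]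
      have hne : xs.count item ≠ 1 := by omega
      simp [hne, htake]
    · -- singleton: A appends the item unchanged
      have hone : xs.count item = 1 := by omega
      have hstep : handle_repetitions_step (PySem.Dict.counter xs) (res, occ) item =
          (res ++ [item], occ) := by
        rw [handle_repetitions_step]
        rw [if_neg (by rw [hcnt, hone]; simp)]
      rw [hstep]
      have hinv : ∀ v, 1 < xs.count v → occ.getD v 0 = ((p ++ [item]).count v : Int) := by
        intro v hv
        have hvi : v ≠ item := by rintro rfl; omega
        have : (p ++ [item]).count v = p.count v := by
          simp [List.count_append, Ne.symm hvi]
        rw [this]; exact hocc v hv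
      rw [ih (p ++ [item]) _ _ (by simpa using h) hinv]
      simp [hone]

lemma A_eq_spec (xs : List String) : handle_repetitions xs = pvSpec xs := by
  have h := handle_repetitions_loop xs xs [] [] PySem.Dict.empty rfl
    (by intro v _; simp [PySem.Dict.getD_empty])
  simpa [handle_repetitions, pvSpec, PySem.List.enumerate] using h

-- ---- B side ----

lemma pvIdxs_pairwise (xs : List String) (s : Int) (item : String) :
    (pvIdxs xs s item).Pairwise (· < ·) := by
  unfold pvIdxs
  exact List.pairwise_map.mpr ((PySem.List.pairwise_lt_enumerate xs s).filter _)

lemma pvIdxs_mem (xs : List String) (item : String) {p : Int}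
    (hp : p ∈ pvIdxs xs 0 item) : ∃ (k : Nat) (hk : k < xs.length), p = (k : Int) ∧ xs[k] = item := by
  unfold pvIdxs at hp
  obtain ⟨q, hq, rfl⟩ := List.mem_map.mp hp
  obtain ⟨hq1, hq2⟩ := List.mem_filter.mp hq
  obtain ⟨k, hk, rfl⟩ := (PySem.List.mem_enumerate_iff _ _ _).mp hq1
  exact ⟨k, hk, by simp, by simpa using hq2⟩

lemma pvIdxs_not_mem (xs : List String) (item : String) (j : Nat) (hj : j < xs.length)
    (hne : xs[j] ≠ item) : (j : Int) ∉ pvIdxs xs 0 item := by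
  intro hmem
  obtain ⟨k, hk, hkj, hki⟩ := pvIdxs_mem xs item hmem
  have : k = j := by exact_mod_cast hkj.symm
  exact hne (this ▸ hki)

lemma pvIdxs_length (xs : List String) (item : String) (s : Int) :
    (pvIdxs xs s item).length = xs.count item := by
  unfold pvIdxs
  rw [List.length_map, ← List.countP_eq_length_filter]
  have : (fun (q : Int × String) => q.2 == item) = (fun x => x == item) ∘ (fun (q : Int × String) => q.2) := rfl
  rw [this, ← List.countP_map, PySem.List.map_snd_enumerate]
  rfl

-- the rank of position j among the positions of item, generalized over both enumerate starts
lemma pvIdxs_key (xs : List String) :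
    ∀ (s t : Int) (item : String) (j : Nat) (hj : j < xs.length), xs[j] = item →
    (t + ((xs.take j).count item : Int), s + (j : Int)) ∈
      PySem.List.enumerate (pvIdxs xs s item) t := by
  induction xs with
  | nil => intro s t item j hj; simp at hj
  | cons x xs' ih =>
    intro s t item j hj hx
    have hidxs : pvIdxs (x :: xs') s item =
        (if x == item then [(s, x)] else []).map (·.1) ++ pvIdxs xs' (s + 1) item := by
      unfold pvIdxs
      rw [PySem.List.enumerate_cons, List.filter_cons]
      split_ifs with hxi <;> simp
    cases j with
    | zero =>
      simp only [List.getElem_cons_zero] at hx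
      subst hx
      simp [hidxs, PySem.List.enumerate_cons]
    | succ k =>
      have hk : k < xs'.length := by simpa using hj
      have hxk : xs'[k] = item := by simpa using hx
      have htk : (x :: xs').take (k + 1) = x :: xs'.take k := rfl
      by_cases hxi : x = item
      · have hcnt : (((x :: xs').take (k + 1)).count item : Int) =
            ((xs'.take k).count item : Int) + 1 := by
          rw [htk]; simp [hxi]
        rw [hidxs]
        have := ih (s + 1) (t + 1) item k hk hxk
        rw [hcnt]
        simp only [hxi, beq_self_eq_true, if_true, List.map, List.cons_append, List.nil_append,
          PySem.List.enumerate_cons]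
        refine List.mem_cons_of_mem _ ?_
        have harith1 : t + (((xs'.take k).count item : Int) + 1) = t + 1 + ((xs'.take k).count item : Int) := by ring
        have harith2 : s + ((k + 1 : Nat) : Int) = s + 1 + (k : Int) := by push_cast; ring
        rw [harith1, harith2]
        exact this
      · have hcnt : (((x :: xs').take (k + 1)).count item : Int) =
            ((xs'.take k).count item : Int) := by
          rw [htk]; simp [hxi]
        rw [hidxs, hcnt]
        have hxi' : (x == item) = false := by simp [hxi]
        simp only [hxi']
        have := ih (s + 1) t item k hk hxk
        have harith2 : s + ((k + 1 : Nat) : Int) = s + 1 + (k : Int) := by push_cast; ring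
        rw [harith2]
        exact this

-- generic scatter over an association list of (position, value) writes
lemma pvScat_length (ws : List (Int × String)) (r : List String) :
    (ws.foldl (fun r p => PySem.List.pySetD r p.1 p.2) r).length = r.length := by
  induction ws generalizing r with
  | nil => rfl
  | cons w ws' ih => rw [List.foldl_cons, ih, PySem.List.length_pySetD]

lemma pvScat_miss (ws : List (Int × String)) (r : List String) (j : Nat) (d : String)
    (hk : ∀ p ∈ ws, ∃ k : Nat, p.1 = (k : Int))
    (hmiss : ∀ p ∈ ws, p.1 ≠ (j : Int)) :
    PySem.List.pyGetD (ws.foldl (fun r p => PySem.List.pySetD r p.1 p.2) r) (j : Int) d =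
      PySem.List.pyGetD r (j : Int) d := by
  induction ws generalizing r with
  | nil => rfl
  | cons w ws' ih =>
    obtain ⟨k, hkk⟩ := hk w (by simp)
    rw [List.foldl_cons,
      ih _ (fun p hp => hk p (by simp [hp])) (fun p hp => hmiss p (by simp [hp]))]
    have hne : k ≠ j := by
      intro h; exact hmiss w (by simp) (by rw [hkk, h])
    rw [hkk, PySem.List.pySetD_natCast]
    simp [List.getD_eq_getElem?_getD, List.getElem?_set_ne hne]

lemma pvScat_hit (ws : List (Int × String)) (r : List String) (j : Nat) (v d : String)
    (hj : j < r.length)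
    (hk : ∀ p ∈ ws, ∃ k : Nat, p.1 = (k : Int))
    (hnd : (ws.map (·.1)).Pairwise (· < ·))
    (hmem : ((j : Int), v) ∈ ws) :
    PySem.List.pyGetD (ws.foldl (fun r p => PySem.List.pySetD r p.1 p.2) r) (j : Int) d = v := by
  induction ws generalizing r with
  | nil => simp at hmem
  | cons w ws' ih =>
    simp only [List.map_cons] at hnd
    rw [List.foldl_cons]
    rcases List.mem_cons.mp hmem with hw | htail
    · -- the head writes position j; later writes have strictly larger keys
      subst hw
      have hmiss : ∀ p ∈ ws', p.1 ≠ (j : Int) := by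
        intro p hp h
        have hlt := (List.pairwise_cons.mp hnd).1 p.1 (List.mem_map_of_mem hp)
        rw [h] at hlt
        exact lt_irrefl ((j : Int)) hlt
      rw [pvScat_miss ws' _ j d (fun p hp => hk p (by simp [hp])) hmiss]
      rw [PySem.List.pySetD_natCast]
      simp [List.getD_eq_getElem?_getD, List.getElem?_set_self (by simpa using hj)]
    · -- the head writes some other position; recurse
      obtain ⟨k, hkk⟩ := hk w (by simp)
      have hne : w.1 ≠ (j : Int) := by
        have hlt := (List.pairwise_cons.mp hnd).1 (j : Int) (List.mem_map_of_mem htail)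
        exact ne_of_lt hlt
      refine ih _ ?_ (fun p hp => hk p (by simp [hp])) (List.pairwise_cons.mp hnd).2 htail
      rw [PySem.List.length_pySetD]; exact hj

-- the inner write loop: positions of `item` get their rank suffix, others are untouched
lemma inner_loop (xs : List String) (item : String) (r : List String)
    (hr : r.length = xs.length) :
    ((PySem.List.enumerate (pvIdxs xs 0 item) 1).foldl
        (fun r q => PySem.List.pySetD r q.2 (item ++ "_" ++ PySem.Int.toStr q.1)) r).length
      = xs.length ∧
    ∀ (j : Nat) (hj : j < xs.length),
      PySem.List.pyGetD ((PySem.List.enumerate (pvIdxs xs 0 item) 1).foldl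
          (fun r q => PySem.List.pySetD r q.2 (item ++ "_" ++ PySem.Int.toStr q.1)) r) (j : Int) "" =
        if xs[j] = item then
          item ++ "_" ++ PySem.Int.toStr (((xs.take (j + 1)).count item : Int))
        else PySem.List.pyGetD r (j : Int) "" := by
  have hfold : ∀ (r : List String),
      (PySem.List.enumerate (pvIdxs xs 0 item) 1).foldl
          (fun r q => PySem.List.pySetD r q.2 (item ++ "_" ++ PySem.Int.toStr q.1)) r =
      ((PySem.List.enumerate (pvIdxs xs 0 item) 1).map
          (fun q => (q.2, item ++ "_" ++ PySem.Int.toStr q.1))).foldl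
          (fun r p => PySem.List.pySetD r p.1 p.2) r := by
    intro r; rw [List.foldl_map]
  set ws := (PySem.List.enumerate (pvIdxs xs 0 item) 1).map
      (fun q => (q.2, item ++ "_" ++ PySem.Int.toStr q.1)) with hws
  have hkeys : ws.map (·.1) = pvIdxs xs 0 item := by
    rw [hws, List.map_map]
    exact PySem.List.map_snd_enumerate _ _
  have hk : ∀ p ∈ ws, ∃ k : Nat, p.1 = (k : Int) := by
    intro p hp
    have : p.1 ∈ ws.map (·.1) := List.mem_map_of_mem hp
    rw [hkeys] at this
    obtain ⟨k, _, hkp, _⟩ := pvIdxs_mem xs item this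
    exact ⟨k, hkp⟩
  have hnd : (ws.map (·.1)).Pairwise (· < ·) := by
    rw [hkeys]; exact pvIdxs_pairwise xs 0 item
  constructor
  · rw [hfold, pvScat_length, hr]
  · intro j hj
    rw [hfold]
    by_cases hx : xs[j] = item
    · -- hit: position j carries rank (take j).count item, giving suffix (take (j+1)).count item
      have hkey := pvIdxs_key xs 0 1 item j hj hx
      have hcnt : (1 : Int) + ((xs.take j).count item : Int) =
          ((xs.take (j + 1)).count item : Int) := by
        have : (xs.take (j + 1)).count item = (xs.take j).count item + 1 := by
          rw [List.take_add_one]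
          simp [List.count_append, List.getElem?_eq_getElem hj, hx]
        rw [this]; push_cast; ring
      have hmem : ((j : Int), item ++ "_" ++
          PySem.Int.toStr (((xs.take (j + 1)).count item : Int))) ∈ ws := by
        rw [hws]
        refine List.mem_map.mpr ⟨(1 + ((xs.take j).count item : Int), (j : Int)), ?_, ?_⟩
        · simpa using hkey
        · simp [hcnt]
      rw [pvScat_hit ws r j _ "" (hr ▸ hj) hk hnd hmem, if_pos hx]
    · have hmiss : ∀ p ∈ ws, p.1 ≠ (j : Int) := by
        intro p hp h
        have : p.1 ∈ ws.map (·.1) := List.mem_map_of_mem hp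
        rw [hkeys, h] at this
        exact pvIdxs_not_mem xs item j hj hx this
      rw [pvScat_miss ws r j "" hk hmiss, if_neg hx]

-- the outer loop over the distinct items
def pvStep (xs result : List String) (item : String) : List String :=
  let idxs := ((PySem.List.enumerate xs).filter (fun q => q.2 == item)).map (·.1)
  if idxs.length > 1 then
    (PySem.List.enumerate idxs 1).foldl
      (fun r q => PySem.List.pySetD r q.2 (item ++ "_" ++ PySem.Int.toStr q.1)) result
  else result

lemma alt_eq_foldl_pvStep (xs : List String) :
    handle_repetitions_alt xs = (PySem.List.dedup xs).foldl (pvStep xs) xs := rfl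

lemma outer_loop (xs : List String) :
    ∀ (items r : List String), r.length = xs.length →
    (items.foldl (pvStep xs) r).length = xs.length ∧
    ∀ (j : Nat) (hj : j < xs.length),
      PySem.List.pyGetD (items.foldl (pvStep xs) r) (j : Int) "" =
        if xs[j] ∈ items ∧ 1 < xs.count xs[j] then
          xs[j] ++ "_" ++ PySem.Int.toStr (((xs.take (j + 1)).count xs[j] : Int))
        else PySem.List.pyGetD r (j : Int) "" := by
  intro items
  induction items with
  | nil =>
    intro r hr
    refine ⟨hr, fun j hj => ?_⟩
    simp
  | cons item rest ih =>
    intro r hr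
    rw [List.foldl_cons]
    by_cases hlen : (((PySem.List.enumerate xs).filter (fun q => q.2 == item)).map (·.1)).length > 1
    · -- this item is duplicated: its positions get written
      have hstep : pvStep xs r item = (PySem.List.enumerate (pvIdxs xs 0 item) 1).foldl
          (fun r q => PySem.List.pySetD r q.2 (item ++ "_" ++ PySem.Int.toStr q.1)) r := by
        simp only [pvStep]
        rw [if_pos hlen]
        rfl
      rw [hstep]
      have hinner := inner_loop xs item r hr
      obtain ⟨hrest_len, hrest⟩ := ih _ hinner.1
      refine ⟨hrest_len, fun j hj => ?_⟩
      rw [hrest j hj, hinner.2 j hj]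
      have hdup : 1 < xs.count item := by
        have hlen' : (pvIdxs xs 0 item).length > 1 := hlen
        rwa [pvIdxs_length] at hlen'
      by_cases hx : xs[j] = item
      · simp [hx, hdup]
      · have hiff : (xs[j] ∈ item :: rest ∧ 1 < xs.count xs[j]) ↔
            (xs[j] ∈ rest ∧ 1 < xs.count xs[j]) := by
          constructor
          · rintro ⟨hm, hc⟩
            rcases List.mem_cons.mp hm with h | h
            · exact absurd h hx
            · exact ⟨h, hc⟩
          · rintro ⟨hm, hc⟩; exact ⟨List.mem_cons_of_mem _ hm, hc⟩
        rw [if_neg hx]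
        by_cases hcase : xs[j] ∈ rest ∧ 1 < xs.count xs[j]
        · rw [if_pos (hiff.mpr hcase), if_pos hcase]
        · rw [if_neg (fun h => hcase (hiff.mp h)), if_neg hcase]
    · -- this item is a singleton: nothing is written
      have hstep : pvStep xs r item = r := by
        simp only [pvStep]
        rw [if_neg hlen]
      rw [hstep]
      obtain ⟨hrest_len, hrest⟩ := ih _ hr
      refine ⟨hrest_len, fun j hj => ?_⟩
      rw [hrest j hj]
      have hone : xs.count item ≤ 1 := by
        have hlen' : ¬ (pvIdxs xs 0 item).length > 1 := hlen
        rw [pvIdxs_length] at hlen'; omega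
      by_cases hx : xs[j] = item
      · have hnc : ¬ 1 < xs.count xs[j] := by rw [hx]; omega
        rw [if_neg (fun h => hnc h.2), if_neg (fun h => hnc h.2)]
      · have hiff : (xs[j] ∈ item :: rest ∧ 1 < xs.count xs[j]) ↔
            (xs[j] ∈ rest ∧ 1 < xs.count xs[j]) := by
          constructor
          · rintro ⟨hm, hc⟩
            rcases List.mem_cons.mp hm with h | h
            · exact absurd h hx
            · exact ⟨h, hc⟩
          · rintro ⟨hm, hc⟩; exact ⟨List.mem_cons_of_mem _ hm, hc⟩
        by_cases hcase : xs[j] ∈ rest ∧ 1 < xs.count xs[j]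
        · rw [if_pos (hiff.mpr hcase), if_pos hcase]
        · rw [if_neg (fun h => hcase (hiff.mp h)), if_neg hcase]

lemma B_eq_spec (xs : List String) : handle_repetitions_alt xs = pvSpec xs := by
  obtain ⟨hlen, hpt⟩ := outer_loop xs (PySem.List.dedup xs) xs rfl
  rw [alt_eq_foldl_pvStep]
  have hlen' : ((PySem.List.dedup xs).foldl (pvStep xs) xs).length = xs.length := hlen
  have hspec_len : (pvSpec xs).length = xs.length := by
    simp [pvSpec, PySem.List.length_enumerate]
  apply List.ext_getElem (by rw [hlen', hspec_len])
  intro j hj1 hj2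
  have hj : j < xs.length := by rw [hlen'] at hj1; exact hj1
  have hmemd : xs[j] ∈ PySem.List.dedup xs := by
    rw [PySem.List.mem_dedup]; exact xs.getElem_mem hj
  have hcpos : 0 < xs.count xs[j] := List.count_pos_iff.mpr (xs.getElem_mem hj)
  have hB : ((PySem.List.dedup xs).foldl (pvStep xs) xs)[j] =
      if 1 < xs.count xs[j] then
        xs[j] ++ "_" ++ PySem.Int.toStr (((xs.take (j + 1)).count xs[j] : Int))
      else xs[j] := by
    have h1 : PySem.List.pyGetD ((PySem.List.dedup xs).foldl (pvStep xs) xs) (j : Int) "" =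
        ((PySem.List.dedup xs).foldl (pvStep xs) xs)[j] := by
      rw [PySem.List.pyGetD_natCast, List.getD_eq_getElem?_getD, List.getElem?_eq_getElem hj1]
      rfl
    have h2 := hpt j hj
    rw [h1] at h2
    rw [h2]
    by_cases hc : 1 < xs.count xs[j]
    · rw [if_pos ⟨hmemd, hc⟩, if_pos hc]
    · rw [if_neg (fun h => hc h.2), if_neg hc,
        PySem.List.pyGetD_natCast, List.getD_eq_getElem?_getD, List.getElem?_eq_getElem hj]
      rfl
  have hS : (pvSpec xs)[j] =
      if xs.count xs[j] == 1 then xs[j]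
      else xs[j] ++ "_" ++
        PySem.Int.toStr (((PySem.List.slice xs none (some ((j : Int) + 1))).count xs[j] : Int)) := by
    simp [pvSpec, PySem.List.getElem_enumerate]
  rw [hB, hS]
  have hslice : PySem.List.slice xs none (some ((j : Int) + 1)) = xs.take (j + 1) := by
    have hc : ((j : Int) + 1) = ((j + 1 : Nat) : Int) := by push_cast; ring
    rw [hc, PySem.List.slice_to_natCast]
  rw [hslice]
  by_cases hc : 1 < xs.count xs[j]
  · have : (xs.count xs[j] == 1) = false := by simp; omega
    rw [if_pos hc, this, if_neg (by simp)]
  · have h1 : xs.count xs[j] = 1 := by omega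
    rw [if_neg hc, if_pos (by simp [h1])]

-- ===== VERDICT (by name: the statement is the Claim_ definition above) =====
theorem handle_repetitions_spec : Claim_equal_handle_repetitions := by
  intro xs _
  show _ = _
  rw [A_eq_spec, B_eq_spec]
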